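-- pv_equiv track=rewrite | github.com/eldad1221/Open_u_python_course | exam_02.py | check
-- ===== SOURCE A (Python) =====
-- def remove_first(target: str, text: str):
--     """
--     מחזיר (found, new_text)
--     found = האם target נמצא ב-text
--     new_text = text אחרי הסרה של ההופעה הראשונה של target
--     (בלי להשתמש ב-in)
--     """
--     if text == "":
--         return False, ""
--
--     if text[0] == target:
--         return True, text[1:]
--
--     found, rest = remove_first(target, text[1:])
--     if found:
--         return True, text[0] + rest
--     return False, text  # לא נמצא -> מחזירים את הטקסט המקורי
--
-- def check(text: str) -> bool:
--     if text == "":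
--         return True
--
--     c = text[0]
--     target = c.swapcase()
--
--     found, remaining = remove_first(target, text[1:])
--     if not found:
--         return False
--
--     return check(remaining)
-- ===== SOURCE B (Python) =====
-- def check(text: str) -> bool:
--     # Counting characterization: the greedy swapcase-pair reduction succeeds
--     # iff every letter occurs as often as its swapcase partner and every
--     # self-swapcase character occurs an even number of times.
--     for ch in set(text):
--         sw = ch.swapcase()
--         if sw == ch:
--             if text.count(ch) % 2 != 0:
--                 return False
--         elif text.count(ch) != text.count(sw):
--             return False
--     return True
-- ===== Notes on version B (the rewrite author's own statement) =====
-- stated objective: faster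
-- what changed: Replaces the quadratic recursive remove-and-recurse pairing with a counting characterization: the string reduces iff each letter's count equals its swapcase partner's count and each self-swapcase character has even count.
import Mathlib
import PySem

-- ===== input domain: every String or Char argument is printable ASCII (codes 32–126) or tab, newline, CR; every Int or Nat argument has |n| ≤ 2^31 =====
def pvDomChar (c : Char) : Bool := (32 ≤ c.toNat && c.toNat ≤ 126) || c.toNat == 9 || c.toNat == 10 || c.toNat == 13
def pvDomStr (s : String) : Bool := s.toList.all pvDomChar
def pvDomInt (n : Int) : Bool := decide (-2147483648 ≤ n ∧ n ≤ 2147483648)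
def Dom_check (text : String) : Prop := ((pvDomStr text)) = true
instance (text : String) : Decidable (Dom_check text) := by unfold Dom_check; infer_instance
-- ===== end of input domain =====

-- B replaces A's quadratic recursive remove-first-swapcase-match pairing by a
-- character-counting balance test (one objective: faster, asymptotically).

-- ===== PORT A =====
-- helper shared by both ports: Python's single-character str.swapcase() on ASCII
def pvSwapc (c : Char) : Char :=
  if PySem.Chars.islower c then PySem.Chars.upperChar c
  else if PySem.Chars.isupper c then PySem.Chars.lowerChar c
  else c

def removeFirst (target : Char) (text : List Char) : Bool × List Char :=
  match text with
  | [] => (false, [])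
  | c :: rest =>
    if c = target then (true, rest)
    else
      let fr := removeFirst target rest
      if fr.1 then (true, c :: fr.2) else (false, c :: rest)

lemma removeFirst_eq (t : Char) (l : List Char) :
    removeFirst t l = if t ∈ l then (true, l.erase t) else (false, l) := by
  induction l with
  | nil => simp [removeFirst]
  | cons c rest ih =>
    simp only [removeFirst, ih]
    by_cases hc : c = t
    · subst hc; simp
    · by_cases hm : t ∈ rest <;>
        simp [hc, hm, Ne.symm hc, List.mem_cons]

lemma removeFirst_len (t : Char) (l : List Char) : (removeFirst t l).2.length ≤ l.length := by
  rw [removeFirst_eq]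
  split_ifs <;> simp [List.length_erase_le]

def checkList (text : List Char) : Bool :=
  match text with
  | [] => true
  | c :: rest =>
    let fr := removeFirst (pvSwapc c) rest
    if fr.1 then checkList fr.2 else false
termination_by text.length
decreasing_by
  have h := removeFirst_len (pvSwapc c) rest
  simp only [List.length_cons]
  omega

def check (text : String) : Bool := checkList text.toList


-- ===== PORT B =====
def checkAltList (text : List Char) : Bool :=
  (PySem.Set.ofList text).all (fun ch =>
    if pvSwapc ch = ch then decide (text.count ch % 2 = 0)
    else decide (text.count ch = text.count (pvSwapc ch)))

def check_alt (text : String) : Bool := checkAltList text.toList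


-- ===== PRECONDITION & SPEC =====
def Spec_check (text : String) (out : Bool) : Prop := out = check_alt text
instance (text : String) (out : Bool) : Decidable (Spec_check text out) := by unfold Spec_check; infer_instance

-- ===== CLAIM (what is proved, stated in full; the proofs are below) =====
def Claim_equal_check : Prop := ∀ (text : String), Dom_check text → Spec_check text (check text)

-- ===== LEMMAS AND PROOFS =====
lemma islower_iff (c : Char) : PySem.Chars.islower c = true ↔ 97 ≤ c.toNat ∧ c.toNat ≤ 122 := by
  simp only [PySem.Chars.islower, Bool.and_eq_true, decide_eq_true_eq, Char.le_def,
    UInt32.le_iff_toNat_le]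
  exact Iff.rfl

lemma isupper_iff (c : Char) : PySem.Chars.isupper c = true ↔ 65 ≤ c.toNat ∧ c.toNat ≤ 90 := by
  simp only [PySem.Chars.isupper, Bool.and_eq_true, decide_eq_true_eq, Char.le_def,
    UInt32.le_iff_toNat_le]
  exact Iff.rfl

lemma toNat_ofNat_valid {n : Nat} (h : n < 0xd800) : (Char.ofNat n).toNat = n := by
  rw [Char.toNat_ofNat, if_pos (Or.inl h)]

lemma toNat_pvSwapc (c : Char) :
    (pvSwapc c).toNat = if 97 ≤ c.toNat ∧ c.toNat ≤ 122 then c.toNat - 32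
      else if 65 ≤ c.toNat ∧ c.toNat ≤ 90 then c.toNat + 32 else c.toNat := by
  unfold pvSwapc PySem.Chars.upperChar PySem.Chars.lowerChar
  by_cases h1 : 97 ≤ c.toNat ∧ c.toNat ≤ 122
  · have hL : PySem.Chars.islower c = true := (islower_iff c).mpr h1
    simp only [hL, if_true, if_pos h1]
    exact toNat_ofNat_valid (by omega)
  · have hL : PySem.Chars.islower c = false := by
      rw [← Bool.not_eq_true, islower_iff]; exact h1
    by_cases h2 : 65 ≤ c.toNat ∧ c.toNat ≤ 90
    · have hU : PySem.Chars.isupper c = true := (isupper_iff c).mpr h2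
      simp only [hL, hU, if_true, Bool.false_eq_true, if_false, if_neg h1, if_pos h2]
      exact toNat_ofNat_valid (by omega)
    · have hU : PySem.Chars.isupper c = false := by
        rw [← Bool.not_eq_true, isupper_iff]; exact h2
      simp only [hL, hU, Bool.false_eq_true, if_false, if_neg h1, if_neg h2]

lemma pvSwapc_invol (c : Char) : pvSwapc (pvSwapc c) = c := by
  have h := toNat_pvSwapc c
  have h2 := toNat_pvSwapc (pvSwapc c)
  rw [h] at h2
  have hEq : (pvSwapc (pvSwapc c)).toNat = c.toNat := by
    split_ifs at h2 h <;> omega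
  calc pvSwapc (pvSwapc c) = Char.ofNat (pvSwapc (pvSwapc c)).toNat := (Char.ofNat_toNat _).symm
    _ = c := by rw [hEq]; exact Char.ofNat_toNat c

lemma pvSwapc_inj {a b : Char} (h : pvSwapc a = pvSwapc b) : a = b := by
  have := congrArg pvSwapc h
  rwa [pvSwapc_invol, pvSwapc_invol] at this

def Bal (l : List Char) : Prop := ∀ d : Char,
  if pvSwapc d = d then l.count d % 2 = 0 else l.count d = l.count (pvSwapc d)

lemma checkAltList_iff (l : List Char) : checkAltList l = true ↔ Bal l := by
  unfold checkAltList Bal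
  rw [List.all_eq_true]
  constructor
  · intro h d
    by_cases hd : d ∈ l
    · have := h d ((PySem.Set.mem_ofList _ _).mpr hd)
      split_ifs at this ⊢ with hs
      · exact of_decide_eq_true (by simpa [hs] using this)
      · exact of_decide_eq_true (by simpa [hs] using this)
    · have h0 : l.count d = 0 := List.count_eq_zero.mpr hd
      split_ifs with hs
      · simp [h0]
      · have h0' : l.count (pvSwapc d) = 0 := by
          by_contra hne
          have hm : pvSwapc d ∈ l := List.count_pos_iff.mp (Nat.pos_of_ne_zero hne)
          have h2 := h (pvSwapc d) ((PySem.Set.mem_ofList _ _).mpr hm)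
          rw [if_neg (fun he => hs (by rw [pvSwapc_invol] at he; exact he.symm))] at h2
          have h3 := of_decide_eq_true h2
          rw [pvSwapc_invol] at h3
          omega
        rw [h0, h0']
  · intro h d hd
    have h1 := h d
    split_ifs at h1 ⊢ with hs <;> simp [h1]

lemma count_cons' (c d : Char) (l : List Char) :
    (c :: l).count d = l.count d + (if d = c then 1 else 0) := by
  rw [List.count_cons]
  by_cases h : d = c
  · rw [if_pos h, if_pos (by rw [h]; exact beq_self_eq_true c)]
  · rw [if_neg h, if_neg (by simp only [beq_iff_eq]; exact fun hh => h hh.symm)]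

lemma bal_mem {c : Char} {rest : List Char} (h : Bal (c :: rest)) : pvSwapc c ∈ rest := by
  have h1 := h c
  by_cases hs : pvSwapc c = c
  · rw [if_pos hs, count_cons', if_pos rfl] at h1
    rw [hs]
    exact List.count_pos_iff.mp (by omega)
  · rw [if_neg hs, count_cons' c c, count_cons' c (pvSwapc c), if_pos rfl, if_neg hs] at h1
    exact List.count_pos_iff.mp (by omega)

lemma bal_cons_iff (c : Char) (rest : List Char) (hm : pvSwapc c ∈ rest) :
    Bal (c :: rest) ↔ Bal (rest.erase (pvSwapc c)) := by
  have h3 : 0 < rest.count (pvSwapc c) := List.count_pos_iff.mpr hm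
  have hcnt : ∀ d : Char, (c :: rest).count d
      = (rest.erase (pvSwapc c)).count d + (if d = c then 1 else 0)
        + (if d = pvSwapc c then 1 else 0) := by
    intro d
    have h2 : (rest.erase (pvSwapc c)).count d
        = rest.count d - (if (pvSwapc c == d) = true then 1 else 0) := List.count_erase
    rw [count_cons']
    by_cases hdt : d = pvSwapc c
    · have h2' : (rest.erase (pvSwapc c)).count d = rest.count d - 1 := by
        rw [h2, if_pos (by rw [hdt]; exact beq_self_eq_true _)]
      have h3' : 0 < rest.count d := by rw [hdt]; exact h3
      rw [if_pos hdt]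
      split_ifs <;> omega
    · have h2' : (rest.erase (pvSwapc c)).count d = rest.count d := by
        rw [h2, if_neg (by simp only [beq_iff_eq]; exact fun hh => hdt hh.symm)]
        omega
      rw [if_neg hdt]
      split_ifs <;> omega
  have key : ∀ d : Char,
      ((if pvSwapc d = d then (c :: rest).count d % 2 = 0
        else (c :: rest).count d = (c :: rest).count (pvSwapc d))) ↔
      ((if pvSwapc d = d then (rest.erase (pvSwapc c)).count d % 2 = 0
        else (rest.erase (pvSwapc c)).count d = (rest.erase (pvSwapc c)).count (pvSwapc d))) := by
    intro d
    have i1 : (pvSwapc d = c) ↔ (d = pvSwapc c) := by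
      constructor
      · intro h; rw [← h, pvSwapc_invol]
      · intro h; rw [h, pvSwapc_invol]
    have i2 : (pvSwapc d = pvSwapc c) ↔ (d = c) := ⟨pvSwapc_inj, fun h => by rw [h]⟩
    have e1 := hcnt d
    have e2 : (c :: rest).count (pvSwapc d)
        = (rest.erase (pvSwapc c)).count (pvSwapc d) + (if d = pvSwapc c then 1 else 0)
          + (if d = c then 1 else 0) := by
      rw [hcnt (pvSwapc d), if_congr i1 rfl rfl, if_congr i2 rfl rfl]
    by_cases hs : pvSwapc d = d
    · rw [if_pos hs, if_pos hs]
      have hct : (d = c) ↔ (d = pvSwapc c) := by rw [← i2, hs]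
      by_cases hdc : d = c
      · have hdt : d = pvSwapc c := hct.mp hdc
        rw [if_pos hdc, if_pos hdt] at e1
        omega
      · have hdt : ¬ d = pvSwapc c := fun x => hdc (hct.mpr x)
        rw [if_neg hdc, if_neg hdt] at e1
        omega
    · rw [if_neg hs, if_neg hs]
      split_ifs at e1 e2 <;> omega
  unfold Bal
  exact forall_congr' key

lemma checkList_cons (c : Char) (rest : List Char) :
    checkList (c :: rest) = if pvSwapc c ∈ rest then checkList (rest.erase (pvSwapc c)) else false := by
  rw [checkList, removeFirst_eq]
  by_cases hm : pvSwapc c ∈ rest <;> simp [hm]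

theorem checkList_iff : ∀ l : List Char, checkList l = true ↔ Bal l
  | [] => by simp [checkList, Bal]
  | c :: rest => by
    rw [checkList_cons]
    by_cases hm : pvSwapc c ∈ rest
    · rw [if_pos hm, checkList_iff (rest.erase (pvSwapc c)), bal_cons_iff c rest hm]
    · rw [if_neg hm]
      simp only [Bool.false_eq_true, false_iff]
      exact fun hB => hm (bal_mem hB)
termination_by l => l.length
decreasing_by
  rw [List.length_erase_of_mem hm, List.length_cons]
  have : 0 < rest.length := List.length_pos_of_mem hm
  omega

lemma check_eq_alt (text : String) : check text = check_alt text := by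
  unfold check check_alt
  rcases h : checkList text.toList with _ | _
  · rcases h2 : checkAltList text.toList with _ | _
    · rfl
    · exact absurd ((checkList_iff _).mpr ((checkAltList_iff _).mp h2)) (by simp [h])
  · rw [(checkAltList_iff _).mpr ((checkList_iff _).mp h)]

-- ===== VERDICT (by name: the statement is the Claim_ definition above) =====
theorem check_spec : Claim_equal_check := by
  intro text _
  exact check_eq_alt text
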